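-- pv_equiv track=rewrite | github.com/MicrochipSecurityFG/Class_HackingTheBadge_2025 | sw/pc/pubkey_hash_from_entropy.py | expand_wildcard_hex
-- ===== SOURCE A (Python) =====
-- import itertools
--
-- def expand_wildcard_hex(template):
--     hex_chars = '0123456789abcdef'
--     wildcard_positions = [i for i, c in enumerate(template) if c.lower() == 'x']
--     for replacements in itertools.product(hex_chars, repeat=len(wildcard_positions)):
--         chars = list(template.lower())
--         for pos, val in zip(wildcard_positions, replacements):
--             chars[pos] = val
--         yield ''.join(chars)
-- ===== SOURCE B (Python) =====
-- def expand_wildcard_hex(template):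
--     hex_chars = '0123456789abcdef'
--     # split the lowered template into the literal segments between wildcards
--     segs = []
--     cur = ''
--     for c in template.lower():
--         if c == 'x':
--             segs.append(cur)
--             cur = ''
--         else:
--             cur += c
--     segs.append(cur)
--     # iteratively take the product: one pass per wildcard, extending every output
--     outputs = [segs[0]]
--     for seg in segs[1:]:
--         outputs = [o + h + seg for o in outputs for h in hex_chars]
--     return outputs
-- ===== Notes on version B (the rewrite author's own statement) =====
-- stated objective: alternative
-- what changed: Replaces the flat itertools.product enumeration (which rebuilds the full lowered character list and re-assigns every wildcard slot for each combination) with a left-to-right recursion over the template that extends a string prefix, branching over the 16 hex digits at each wildcard position.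
import Mathlib
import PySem

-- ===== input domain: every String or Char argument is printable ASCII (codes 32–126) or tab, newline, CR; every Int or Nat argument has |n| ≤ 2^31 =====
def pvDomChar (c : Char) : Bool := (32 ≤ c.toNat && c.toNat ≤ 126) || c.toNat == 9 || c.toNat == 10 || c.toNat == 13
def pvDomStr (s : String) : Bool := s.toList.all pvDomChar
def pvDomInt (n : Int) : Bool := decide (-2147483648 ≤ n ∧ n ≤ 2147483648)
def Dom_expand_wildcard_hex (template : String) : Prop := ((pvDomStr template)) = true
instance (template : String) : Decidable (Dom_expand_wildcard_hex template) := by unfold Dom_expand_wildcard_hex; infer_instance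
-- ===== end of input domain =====

-- B replaces A's flat itertools.product enumeration (per combination: rebuild the lowered list and
-- re-assign every wildcard slot) with a segment split at the wildcards plus an iterative product fold.
-- A is a generator, B returns a list: equal once the generator is listed.

-- ===== PORT A =====
-- hex_chars = '0123456789abcdef'
def pvHex : List Char := ['0','1','2','3','4','5','6','7','8','9','a','b','c','d','e','f']

-- itertools.product(hex_chars, repeat=n): leftmost coordinate varies slowest
def pvProduct : Nat → List (List Char)
  | 0 => [[]]
  | n+1 => pvHex.flatMap (fun h => (pvProduct n).map (h :: ·))

-- [i for i, c in enumerate(template, start) if c.lower() == 'x']  (start generalised; A calls it with 0)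
def pvWildPos (s : Int) (cs : List Char) : List Int :=
  ((PySem.List.enumerate cs s).filter (fun p => PySem.Chars.lowerChar p.2 == 'x')).map (·.1)

-- the inner 'for pos, val in zip(...): chars[pos] = val' loop (positions are nonnegative enumerate indices)
def pvAssign (l : List Char) (pairs : List (Int × Char)) : List Char :=
  pairs.foldl (fun acc pv => acc.set pv.1.toNat pv.2) l

def expand_wildcard_hex (template : String) : List String :=
  let cs := template.toList
  let wildcard_positions := pvWildPos 0 cs
  (pvProduct wildcard_positions.length).map (fun replacements =>
    String.ofList (pvAssign (PySem.Chars.lower cs) (wildcard_positions.zip replacements)))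

-- ===== PORT B =====
-- the segment-collecting scan: 'for c in template.lower(): if c == "x": segs.append(cur); cur = "" else: cur += c'
-- followed by 'segs.append(cur)' (strings carried as List Char)
def pvSegs : List Char → List Char → List (List Char)
  | [], cur => [cur]
  | c :: rest, cur => if c == 'x' then cur :: pvSegs rest [] else pvSegs rest (cur ++ [c])

-- 'for seg in segs[1:]: outputs = [o + h + seg for o in outputs for h in hex_chars]'
def pvBuild (outs : List (List Char)) (segs : List (List Char)) : List (List Char) :=
  segs.foldl (fun outs seg => outs.flatMap (fun o => pvHex.map (fun h => o ++ h :: seg))) outs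

def expand_wildcard_hex_alt (template : String) : List String :=
  match pvSegs (PySem.Chars.lower template.toList) [] with
  | [] => []   -- unreachable: the scan always yields at least one segment
  | s0 :: rest => (pvBuild [s0] rest).map String.ofList

-- ===== PRECONDITION & SPEC =====
def Spec_expand_wildcard_hex (template : String) (out : List String) : Prop := out = expand_wildcard_hex_alt template
instance (template : String) (out : List String) : Decidable (Spec_expand_wildcard_hex template out) := by unfold Spec_expand_wildcard_hex; infer_instance

-- ===== CLAIM (what is proved, stated in full; the proofs are below) =====
def Claim_equal_expand_wildcard_hex : Prop := ∀ (template : String), Dom_expand_wildcard_hex template → Spec_expand_wildcard_hex template (expand_wildcard_hex template)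

-- ===== LEMMAS AND PROOFS =====

-- recursive description of the result on the UN-lowered character list
def pvE : List Char → List (List Char)
  | [] => [[]]
  | c :: cs =>
    if PySem.Chars.lowerChar c == 'x' then pvHex.flatMap (fun h => (pvE cs).map (h :: ·))
    else (pvE cs).map (PySem.Chars.lowerChar c :: ·)

-- the same on an already-lowered list
def pvE' : List Char → List (List Char)
  | [] => [[]]
  | c :: cs =>
    if c == 'x' then pvHex.flatMap (fun h => (pvE' cs).map (h :: ·))
    else (pvE' cs).map (c :: ·)

theorem pvE_eq_lower (cs : List Char) : pvE cs = pvE' (PySem.Chars.lower cs) := by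
  induction cs with
  | nil => rfl
  | cons c cs ih => simp only [pvE, PySem.Chars.lower, List.map_cons, pvE', ih]

-- ===== A side =====

theorem pvWildPos_cons (s : Int) (c : Char) (cs : List Char) :
    pvWildPos s (c :: cs) =
      if PySem.Chars.lowerChar c == 'x' then s :: pvWildPos (s+1) cs else pvWildPos (s+1) cs := by
  by_cases h : PySem.Chars.lowerChar c == 'x' <;>
    simp [pvWildPos, PySem.List.enumerate_cons, h]

theorem pvWildPos_shift (cs : List Char) : ∀ s : Int,
    pvWildPos s cs = (pvWildPos 0 cs).map (· + s) := by
  induction cs with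
  | nil => intro s; simp [pvWildPos]
  | cons c cs ih =>
    intro s
    rw [pvWildPos_cons, pvWildPos_cons, ih (s+1), ih (0+1)]
    by_cases h : PySem.Chars.lowerChar c == 'x' <;>
      simp [h, List.map_map, Function.comp_def] <;>
      exact fun p _ => by ring

theorem pvWildPos_shift_one (cs : List Char) :
    pvWildPos (0+1) cs = (pvWildPos 0 cs).map (· + 1) := pvWildPos_shift cs (0+1)

theorem pvWildPos_nonneg (cs : List Char) (p : Int) (hp : p ∈ pvWildPos 0 cs) : 0 ≤ p := by
  simp only [pvWildPos, List.mem_map, List.mem_filter] at hp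
  obtain ⟨q, ⟨hq, _⟩, rfl⟩ := hp
  rw [PySem.List.mem_enumerate_iff] at hq
  obtain ⟨k, hk, rfl⟩ := hq
  simp

theorem pvAssign_shift (ps : List Int) : ∀ (r : List Char) (a : Char) (l : List Char),
    (∀ p ∈ ps, 0 ≤ p) →
    pvAssign (a :: l) ((ps.map (· + 1)).zip r) = a :: pvAssign l (ps.zip r) := by
  induction ps with
  | nil => intro r a l _; simp [pvAssign]
  | cons p ps ih =>
    intro r a l hnn
    cases r with
    | nil => simp [pvAssign]
    | cons v r =>
      have hp : 0 ≤ p := hnn p (by simp)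
      have ht : (p + 1).toNat = p.toNat + 1 := by omega
      simp only [List.map_cons, List.zip_cons_cons, pvAssign, List.foldl_cons, ht,
        List.set_cons_succ]
      exact ih r a (l.set p.toNat v) (fun q hq => hnn q (by simp [hq]))

theorem pvA_core (cs : List Char) :
    (pvProduct (pvWildPos 0 cs).length).map
      (fun r => pvAssign (PySem.Chars.lower cs) ((pvWildPos 0 cs).zip r)) = pvE cs := by
  induction cs with
  | nil => simp [pvWildPos, pvProduct, pvAssign, pvE, PySem.Chars.lower]
  | cons c cs ih =>
    have hlc : PySem.Chars.lower (c :: cs) = PySem.Chars.lowerChar c :: PySem.Chars.lower cs := by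
      simp [PySem.Chars.lower]
    rw [pvWildPos_cons, pvWildPos_shift_one]
    by_cases h : PySem.Chars.lowerChar c == 'x'
    · -- wildcard position 0 plus shifted positions; product of length n+1
      simp only [h, if_pos, List.length_cons, List.length_map, pvProduct, pvE, hlc,
        List.map_flatMap]
      congr 1
      funext hc
      simp only [Function.comp_def, List.map_map]
      rw [← ih, List.map_map]
      apply List.map_congr_left
      intro r _
      simp only [Function.comp_def, List.zip_cons_cons]
      show pvAssign ((PySem.Chars.lowerChar c :: PySem.Chars.lower cs).set (0:Int).toNat hc)
            (((pvWildPos 0 cs).map (· + 1)).zip r) = _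
      rw [show ((0:Int).toNat) = 0 from rfl, List.set_cons_zero,
        pvAssign_shift _ r hc _ (pvWildPos_nonneg cs)]
    · rw [if_neg h]
      simp only [pvE, List.length_map, hlc]
      rw [if_neg h, ← ih, List.map_map]
      apply List.map_congr_left
      intro r _
      simp only [Function.comp_def]
      rw [pvAssign_shift _ r _ _ (pvWildPos_nonneg cs)]

-- ===== B side =====

theorem pvBuild_nil (segs : List (List Char)) : pvBuild [] segs = [] := by
  induction segs with
  | nil => rfl
  | cons s segs ih => simpa [pvBuild] using ih

theorem pvBuild_append (segs : List (List Char)) : ∀ as bs : List (List Char),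
    pvBuild (as ++ bs) segs = pvBuild as segs ++ pvBuild bs segs := by
  induction segs with
  | nil => intro as bs; rfl
  | cons s segs ih =>
    intro as bs
    simp only [pvBuild, List.foldl_cons, List.flatMap_append]
    exact ih _ _

theorem pvBuild_map_flat {α : Type} (xs : List α) (f : α → List Char)
    (segs : List (List Char)) :
    pvBuild (xs.map f) segs = xs.flatMap (fun x => pvBuild [f x] segs) := by
  induction xs with
  | nil => simp [pvBuild_nil]
  | cons x xs ih =>
    rw [List.map_cons, show f x :: xs.map f = [f x] ++ xs.map f from rfl,
      pvBuild_append, ih, List.flatMap_cons]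

theorem pvBuild_prefix (segs : List (List Char)) : ∀ (outs : List (List Char)) (p : List Char),
    pvBuild (outs.map (p ++ ·)) segs = (pvBuild outs segs).map (p ++ ·) := by
  induction segs with
  | nil => intro outs p; rfl
  | cons s segs ih =>
    intro outs p
    simp only [pvBuild, List.foldl_cons]
    rw [show (outs.map (p ++ ·)).flatMap (fun o => pvHex.map (fun h => o ++ h :: s))
          = (outs.flatMap (fun o => pvHex.map (fun h => o ++ h :: s))).map (p ++ ·) by
        simp [List.map_flatMap, List.flatMap_map, List.map_map, Function.comp_def]]
    exact ih _ p

theorem pvSegs_ne_nil (cs : List Char) : ∀ cur, pvSegs cs cur ≠ [] := by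
  induction cs with
  | nil => intro cur; simp [pvSegs]
  | cons c cs ih =>
    intro cur
    by_cases h : c == 'x' <;> simp [pvSegs, h, ih]

theorem pvB_core (cs : List Char) : ∀ cur : List Char,
    (match pvSegs cs cur with
     | [] => []
     | s0 :: rest => pvBuild [s0] rest) = (pvE' cs).map (cur ++ ·) := by
  induction cs with
  | nil => intro cur; simp [pvSegs, pvBuild, pvE']
  | cons c cs ih =>
    intro cur
    by_cases h : c == 'x'
    · obtain ⟨s0, rest, hsr⟩ : ∃ s0 rest, pvSegs cs [] = s0 :: rest := by
        cases hh : pvSegs cs [] with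
        | nil => exact absurd hh (pvSegs_ne_nil cs [])
        | cons a b => exact ⟨a, b, rfl⟩
      have ihz := ih []
      rw [hsr] at ihz
      simp only [List.nil_append, List.map_id'] at ihz
      simp only [pvSegs, h, if_pos, hsr, pvE']
      rw [show pvBuild [cur] (s0 :: rest)
            = pvBuild (pvHex.map (fun hc => cur ++ hc :: s0)) rest by simp [pvBuild],
        pvBuild_map_flat]
      have hb : ∀ x : Char, pvBuild [cur ++ x :: s0] rest
          = (pvE' cs).map (fun t => cur ++ x :: t) := by
        intro x
        have hpre := pvBuild_prefix rest [s0] (cur ++ [x])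
        simp only [List.map_cons, List.map_nil, List.append_assoc, List.singleton_append] at hpre
        rw [hpre, ihz]
      simp only [hb, List.map_flatMap, List.map_map, Function.comp_def]
    · simp only [pvSegs, h, Bool.false_eq_true, if_false, pvE']
      rw [ih (cur ++ [c]), List.map_map]
      apply List.map_congr_left; intro t _; simp

-- ===== VERDICT (by name: the statement is the Claim_ definition above) =====
theorem expand_wildcard_hex_spec : Claim_equal_expand_wildcard_hex := by
  intro template _
  unfold Spec_expand_wildcard_hex expand_wildcard_hex expand_wildcard_hex_alt
  obtain ⟨s0, rest, hsr⟩ :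
      ∃ s0 rest, pvSegs (PySem.Chars.lower template.toList) [] = s0 :: rest := by
    cases hh : pvSegs (PySem.Chars.lower template.toList) [] with
    | nil => exact absurd hh (pvSegs_ne_nil _ [])
    | cons a b => exact ⟨a, b, rfl⟩
  have hb := pvB_core (PySem.Chars.lower template.toList) []
  rw [hsr] at hb
  simp only [List.nil_append, List.map_id'] at hb
  rw [hsr]
  simp only []
  rw [hb, ← pvE_eq_lower, ← pvA_core template.toList, List.map_map]
  rfl
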